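-- pv_equiv track=rewrite | github.com/wildfire070/crossink | scripts/gen_i18n.py | _unescape_yaml_value
-- ===== SOURCE A (Python) =====
-- from typing import Dict, List, Optional, Set, Tuple
--
-- def _unescape_yaml_value(raw: str, filepath: str = "", line_num: int = 0) -> str:
--     """
--     Process escape sequences in a YAML value string.
--
--     Recognized escapes:  \\\\  →  \\       \\"  →  "       \\n  →  newline
--     """
--     result: List[str] = []
--     i = 0
--     while i < len(raw):
--         if raw[i] == "\\" and i + 1 < len(raw):
--             nxt = raw[i + 1]
--             if nxt == "\\":
--                 result.append("\\")
--             elif nxt == '"':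
--                 result.append('"')
--             elif nxt == "n":
--                 result.append("\n")
--             else:
--                 raise ValueError(f"{filepath}:{line_num}: unknown escape '\\{nxt}'")
--             i += 2
--         else:
--             result.append(raw[i])
--             i += 1
--     return "".join(result)
-- ===== SOURCE B (Python) =====
-- from typing import Dict, List, Optional, Set, Tuple
--
-- def _unescape_yaml_value(raw: str, filepath: str = "", line_num: int = 0) -> str:
--     """Unescape by splitting on the backslash: each later chunk starts with the
--     escaped character; an empty chunk encodes an escaped backslash (whose next
--     chunk is then literal), and a trailing empty chunk is a lone backslash."""
--     parts = raw.split("\\")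
--     out = [parts[0]]
--     j = 1
--     n = len(parts)
--     while j < n:
--         p = parts[j]
--         if p == "":
--             if j + 1 < n:
--                 out.append("\\" + parts[j + 1])
--                 j += 2
--             else:
--                 out.append("\\")
--                 j += 1
--         else:
--             c = p[0]
--             if c == '"':
--                 out.append('"' + p[1:])
--             elif c == "n":
--                 out.append("\n" + p[1:])
--             else:
--                 raise ValueError(f"{filepath}:{line_num}: unknown escape '\\{c}'")
--             j += 1
--     return "".join(out)
-- ===== Notes on version B (the rewrite author's own statement) =====
-- stated objective: faster
-- what changed: B replaces A's per-character index loop with one str.split on the backslash followed by a single pass over the chunks (an empty chunk encodes an escaped backslash, a trailing empty chunk a lone backslash, otherwise the chunk's first character is the escaped one), moving the character scanning into the C-level split.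
import Mathlib
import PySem

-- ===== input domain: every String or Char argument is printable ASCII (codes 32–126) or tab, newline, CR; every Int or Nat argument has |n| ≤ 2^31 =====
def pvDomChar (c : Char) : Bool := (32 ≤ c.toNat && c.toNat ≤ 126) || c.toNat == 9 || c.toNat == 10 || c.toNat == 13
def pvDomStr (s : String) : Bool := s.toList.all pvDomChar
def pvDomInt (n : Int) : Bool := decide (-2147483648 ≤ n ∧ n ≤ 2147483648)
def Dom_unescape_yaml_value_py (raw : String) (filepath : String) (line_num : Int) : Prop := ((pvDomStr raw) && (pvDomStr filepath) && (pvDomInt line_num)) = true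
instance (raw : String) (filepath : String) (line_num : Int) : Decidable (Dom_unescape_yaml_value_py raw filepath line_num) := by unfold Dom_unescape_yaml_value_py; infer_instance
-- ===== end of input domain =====

-- B unescapes by splitting on the backslash and walking the chunks instead of A's
-- index loop over characters (objective: alternative); A raises ValueError on an
-- unknown escape — those inputs are excluded by Pre_ (B raises there too).


-- ===== PORT A =====
-- A's while loop over the character index; `result.append`/`''.join` is represented by
-- consing the appended characters onto the recursive result. `none` = the ValueError
-- branch (unknown escape), excluded by Pre_ below.
def pvUnescapeLoop : List Char → Option (List Char)
  | [] => some []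
  | c :: rest =>
    if c = '\\' then
      match rest with
      | [] => some [c]                 -- i + 1 < len(raw) fails: append raw[i]
      | d :: rest' =>
        if d = '\\' then (pvUnescapeLoop rest').map (fun r => '\\' :: r)
        else if d = '"' then (pvUnescapeLoop rest').map (fun r => '"' :: r)
        else if d = 'n' then (pvUnescapeLoop rest').map (fun r => '\n' :: r)
        else none                      -- raise ValueError(...)
    else (pvUnescapeLoop rest).map (fun r => c :: r)

def unescape_yaml_value_py (raw : String) (filepath : String) (line_num : Int) : String :=
  String.mk ((pvUnescapeLoop raw.toList).getD [])   -- .getD [] is junk: none is outside Pre_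

-- ===== PORT B =====
-- B's while loop over the chunks of raw.split("\\"): an empty chunk means the escaped
-- char was itself a backslash (next chunk literal), a trailing empty chunk a lone
-- backslash; otherwise the chunk's first char is the escaped one. `out`/`''.join` is
-- represented by appending each chunk onto the recursive result.
def pvBWalk : List (List Char) → Option (List Char)
  | [] => some []
  | p :: rest =>
    match p with
    | [] =>
      match rest with
      | q :: rest' => (pvBWalk rest').map (fun r => ('\\' :: q) ++ r)
      | [] => some ['\\']
    | c :: cs =>
      if c = '"' then (pvBWalk rest).map (fun r => ('"' :: cs) ++ r)
      else if c = 'n' then (pvBWalk rest).map (fun r => ('\n' :: cs) ++ r)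
      else none                        -- raise ValueError(...)

def unescape_yaml_value_py_alt (raw : String) (filepath : String) (line_num : Int) : String :=
  match PySem.Chars.splitOn raw.toList ['\\'] with
  | [] => ""                           -- unreachable: str.split never returns []
  | p0 :: ps => String.mk (p0 ++ ((pvBWalk ps).getD []))

-- ===== PRECONDITION & SPEC =====
-- Pre_ excludes exactly the inputs on which A raises ValueError (an "escaping"
-- backslash — one preceded by an even run of backslashes — followed by a character
-- other than '\', '"', 'n'); B raises the identical ValueError there.
def Pre_unescape_yaml_value_py (raw : String) (filepath : String) (line_num : Int) : Prop :=
  ∀ i < raw.toList.length, raw.toList[i]? = some '\\' →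
    ((raw.toList.take i).reverse.takeWhile (· = '\\')).length % 2 = 0 →
    i + 1 < raw.toList.length →
    (raw.toList[i+1]? = some '\\' ∨ raw.toList[i+1]? = some '"' ∨ raw.toList[i+1]? = some 'n')
instance (raw : String) (filepath : String) (line_num : Int) : Decidable (Pre_unescape_yaml_value_py raw filepath line_num) := by unfold Pre_unescape_yaml_value_py; exact Nat.decidableBallLT _ _

def pvWitness_unescape_yaml_value_py : String × String × Int := ("a\\nb\\\\c", "f.yml", 3)

def Spec_unescape_yaml_value_py (raw : String) (filepath : String) (line_num : Int) (out : String) : Prop := out = unescape_yaml_value_py_alt raw filepath line_num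
instance (raw : String) (filepath : String) (line_num : Int) (out : String) : Decidable (Spec_unescape_yaml_value_py raw filepath line_num out) := by unfold Spec_unescape_yaml_value_py; infer_instance

-- ===== CLAIM (what is proved, stated in full; the proofs are below) =====
def Claim_equal_unescape_yaml_value_py : Prop := ∀ (raw : String) (filepath : String) (line_num : Int), Dom_unescape_yaml_value_py raw filepath line_num → Pre_unescape_yaml_value_py raw filepath line_num → Spec_unescape_yaml_value_py raw filepath line_num (unescape_yaml_value_py raw filepath line_num)

-- ===== LEMMAS AND PROOFS =====

-- clean recursive characterisation of  l.split('\\')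
def pvSplitB : List Char → List (List Char)
  | [] => [[]]
  | c :: rest =>
    if c = '\\' then [] :: pvSplitB rest
    else
      match pvSplitB rest with
      | p :: ps => (c :: p) :: ps
      | [] => [[c]]

theorem pvSplitB_ne_nil (l : List Char) : pvSplitB l ≠ [] := by
  cases l with
  | nil => simp [pvSplitB]
  | cons c rest =>
    simp only [pvSplitB]
    split <;> try simp
    split <;> simp

theorem pvGo_eq (fuel : Nat) : ∀ (l cur : List Char) (acc : List (List Char)),
    l.length < fuel →
    PySem.Chars.splitOn.go ['\\'] fuel l cur acc =
      acc.reverse ++ (match pvSplitB l with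
                      | p :: ps => (cur.reverse ++ p) :: ps
                      | [] => []) := by
  induction fuel with
  | zero => intro l cur acc h; omega
  | succ fuel ih =>
    intro l cur acc h
    cases l with
    | nil => simp [PySem.Chars.splitOn.go, pvSplitB]
    | cons c rest =>
      rw [PySem.Chars.splitOn.go]
      by_cases hc : c = '\\'
      · subst hc
        simp only [List.isPrefixOf, BEq.rfl, Bool.true_and, if_true,
          List.length_cons, List.length_nil, List.drop_succ_cons, List.drop_zero]
        rw [ih rest [] (cur.reverse :: acc) (by simp only [List.length_cons] at h; omega)]
        simp only [pvSplitB, if_true]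
        cases hs : pvSplitB rest with
        | nil => exact absurd hs (pvSplitB_ne_nil rest)
        | cons p ps => simp
      · have : (['\\'].isPrefixOf (c :: rest)) = false := by
          simp only [List.isPrefixOf, List.isPrefixOf_nil_left, Bool.and_true,
            beq_eq_false_iff_ne, ne_eq]
          exact fun h' => hc h'.symm
        rw [this]
        simp only [Bool.false_eq_true, if_false]
        rw [ih rest (c :: cur) acc (by simp only [List.length_cons] at h; omega)]
        simp only [pvSplitB, hc, if_false]
        cases hs : pvSplitB rest with
        | nil => exact absurd hs (pvSplitB_ne_nil rest)
        | cons p ps => simp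

theorem pvSplitOn_eq (l : List Char) : PySem.Chars.splitOn l ['\\'] = pvSplitB l := by
  show PySem.Chars.splitOn.go ['\\'] (l.length + 1) l [] [] = _
  rw [pvGo_eq (l.length + 1) l [] [] (by omega)]
  cases hs : pvSplitB l with
  | nil => exact absurd hs (pvSplitB_ne_nil l)
  | cons p ps => simp

-- the split walk computes exactly what the character loop computes
theorem pvWalk_eq (l : List Char) :
    (match pvSplitB l with
     | p0 :: ps => (pvBWalk ps).map (fun r => p0 ++ r)
     | [] => none) = pvUnescapeLoop l := by
  induction l using pvUnescapeLoop.induct with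
  | case1 => simp [pvSplitB, pvBWalk, pvUnescapeLoop]
  | case2 => simp [pvSplitB, pvBWalk, pvUnescapeLoop]
  | case3 rest ih =>
    cases hs : pvSplitB rest with
    | nil => exact absurd hs (pvSplitB_ne_nil rest)
    | cons q qs =>
      rw [hs] at ih
      have hA : pvUnescapeLoop ('\\' :: '\\' :: rest) = (pvUnescapeLoop rest).map (fun r => '\\' :: r) := by
        simp [pvUnescapeLoop]
      simp only [pvSplitB, if_pos rfl, hs, hA, ← ih, pvBWalk]
      cases hq : pvBWalk qs <;> simp [pvBWalk, hq]
  | case4 rest h1 ih =>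
    cases hs : pvSplitB rest with
    | nil => exact absurd hs (pvSplitB_ne_nil rest)
    | cons q qs =>
      rw [hs] at ih
      have hA : pvUnescapeLoop ('\\' :: '"' :: rest) = (pvUnescapeLoop rest).map (fun r => '"' :: r) := by
        simp [pvUnescapeLoop]
      simp only [pvSplitB, if_pos rfl, if_neg (by decide : ¬('"' : Char) = '\\'), hs, hA, ← ih, pvBWalk, if_pos rfl]
      cases hq : pvBWalk qs <;> simp [pvBWalk, hq]
  | case5 rest h1 h2 ih =>
    cases hs : pvSplitB rest with
    | nil => exact absurd hs (pvSplitB_ne_nil rest)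
    | cons q qs =>
      rw [hs] at ih
      have hA : pvUnescapeLoop ('\\' :: 'n' :: rest) = (pvUnescapeLoop rest).map (fun r => '\n' :: r) := by
        simp [pvUnescapeLoop]
      simp only [pvSplitB, if_pos rfl, if_neg (by decide : ¬('n' : Char) = '\\'), hs, hA, ← ih, pvBWalk,
        if_neg (by decide : ¬('n' : Char) = '"'), if_pos rfl]
      cases hq : pvBWalk qs <;> simp [pvBWalk, hq]
  | case6 d rest hd1 hd2 hd3 =>
    have hA : pvUnescapeLoop ('\\' :: d :: rest) = none := by
      simp [pvUnescapeLoop, hd1, hd2, hd3]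
    cases hs : pvSplitB rest with
    | nil => exact absurd hs (pvSplitB_ne_nil rest)
    | cons q qs =>
      simp only [pvSplitB, if_pos rfl, if_neg hd1, hs, hA]
      simp [pvBWalk, hd2, hd3]
  | case7 d rest hd ih =>
    cases hs : pvSplitB rest with
    | nil => exact absurd hs (pvSplitB_ne_nil rest)
    | cons q qs =>
      rw [hs] at ih
      have hA : pvUnescapeLoop (d :: rest) = (pvUnescapeLoop rest).map (fun r => d :: r) := by
        rw [pvUnescapeLoop.eq_def]; simp [hd]
      simp only [pvSplitB, if_neg hd, hs, hA, ← ih]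
      cases hq : pvBWalk qs <;> simp [pvBWalk, hq]

-- trailing backslash-run length of a prefix, and how consing changes it
def pvRun (t : List Char) : Nat := (t.reverse.takeWhile (· = '\\')).length

theorem pvRun_cons (c : Char) (t : List Char) :
    pvRun (c :: t) = pvRun t + (if c = '\\' ∧ t.all (· = '\\') then 1 else 0) := by
  unfold pvRun
  rw [List.reverse_cons, List.takeWhile_append]
  by_cases ha : t.all (· = '\\')
  · have hall : t.reverse.takeWhile (· = '\\') = t.reverse :=
      List.takeWhile_eq_self_iff.mpr (by
        intro x hx
        have := (List.all_eq_true.mp ha) x (List.mem_reverse.mp hx)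
        simpa using this)
    rw [hall]
    by_cases hc : c = '\\' <;> simp [hc, ha, hall, List.takeWhile]
  · have hne : ¬ ((t.reverse.takeWhile fun x => decide (x = '\\')).length = t.reverse.length) := by
      intro hlen
      have heq := (List.takeWhile_prefix (l := t.reverse) (p := fun x => decide (x = '\\'))).eq_of_length hlen
      have hall := List.takeWhile_eq_self_iff.mp heq
      exact ha (List.all_eq_true.mpr (fun x hx => by
        simpa using hall x (List.mem_reverse.mpr hx)))
    rw [if_neg hne]
    simp [ha]

theorem pvLoop_none (l : List Char) :
    pvUnescapeLoop l = none →
    ∃ t d u, l = t ++ '\\' :: d :: u ∧ pvRun t % 2 = 0 ∧ d ≠ '\\' ∧ d ≠ '"' ∧ d ≠ 'n' := by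
  induction l using pvUnescapeLoop.induct with
  | case1 => simp [pvUnescapeLoop]
  | case2 => simp [pvUnescapeLoop]
  | case3 rest ih =>
    have hA : pvUnescapeLoop ('\\' :: '\\' :: rest) = (pvUnescapeLoop rest).map (fun r => '\\' :: r) := by
      simp [pvUnescapeLoop]
    rw [hA]
    simp only [Option.map_eq_none_iff]
    intro hnone
    obtain ⟨t, e, u, rfl, hrun, h1, h2, h3⟩ := ih hnone
    refine ⟨'\\' :: '\\' :: t, e, u, by simp, ?_, h1, h2, h3⟩
    rw [pvRun_cons, pvRun_cons]
    have hsame : ('\\' :: t).all (· = '\\') = t.all (· = '\\') := by simp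
    by_cases ha : t.all (· = '\\') <;> simp [hsame, ha] <;> omega
  | case4 rest h1 ih =>
    have hA : pvUnescapeLoop ('\\' :: '"' :: rest) = (pvUnescapeLoop rest).map (fun r => '"' :: r) := by
      simp [pvUnescapeLoop]
    rw [hA]
    simp only [Option.map_eq_none_iff]
    intro hnone
    obtain ⟨t, e, u, rfl, hrun, hh1, hh2, hh3⟩ := ih hnone
    refine ⟨'\\' :: '"' :: t, e, u, by simp, ?_, hh1, hh2, hh3⟩
    rw [pvRun_cons, pvRun_cons]
    have h4 : ('"' :: t).all (· = '\\') = false := by simp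
    simpa [h4] using hrun
  | case5 rest h1 h2 ih =>
    have hA : pvUnescapeLoop ('\\' :: 'n' :: rest) = (pvUnescapeLoop rest).map (fun r => '\n' :: r) := by
      simp [pvUnescapeLoop]
    rw [hA]
    simp only [Option.map_eq_none_iff]
    intro hnone
    obtain ⟨t, e, u, rfl, hrun, hh1, hh2, hh3⟩ := ih hnone
    refine ⟨'\\' :: 'n' :: t, e, u, by simp, ?_, hh1, hh2, hh3⟩
    rw [pvRun_cons, pvRun_cons]
    have h4 : ('n' :: t).all (· = '\\') = false := by simp
    simpa [h4] using hrun
  | case6 d rest hd1 hd2 hd3 =>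
    intro _
    exact ⟨[], d, rest, by simp, by simp [pvRun], hd1, hd2, hd3⟩
  | case7 d rest hd ih =>
    have hA : pvUnescapeLoop (d :: rest) = (pvUnescapeLoop rest).map (fun r => d :: r) := by
      rw [pvUnescapeLoop.eq_def]; simp [hd]
    rw [hA]
    simp only [Option.map_eq_none_iff]
    intro hnone
    obtain ⟨t, e, u, rfl, hrun, hh1, hh2, hh3⟩ := ih hnone
    refine ⟨d :: t, e, u, by simp, ?_, hh1, hh2, hh3⟩
    rw [pvRun_cons]
    simpa [hd] using hrun

theorem pvPre_isSome (raw : String) (filepath : String) (line_num : Int)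
    (hpre : Pre_unescape_yaml_value_py raw filepath line_num) :
    (pvUnescapeLoop raw.toList).isSome := by
  by_contra h
  rw [Option.not_isSome_iff_eq_none] at h
  obtain ⟨t, d, u, hl, hrun, h1, h2, h3⟩ := pvLoop_none raw.toList h
  have hi : raw.toList[t.length]? = some '\\' := by
    rw [hl, List.getElem?_append_right (le_refl _)]
    simp
  have hi1 : raw.toList[t.length + 1]? = some d := by
    rw [hl, List.getElem?_append_right (by omega)]
    simp
  have hlen : t.length + 1 < raw.toList.length := by
    rw [hl]; simp
  have htake : raw.toList.take t.length = t := by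
    rw [hl, List.take_left]
  have := hpre t.length (by omega) hi (by rw [htake]; exact hrun) hlen
  rcases this with h' | h' | h' <;> rw [hi1] at h' <;> simp at h' <;> [exact h1 h'; exact h2 h'; exact h3 h']

-- ===== VERDICT (by name: the statement is the Claim_ definition above) =====
theorem unescape_yaml_value_py_spec : Claim_equal_unescape_yaml_value_py := by
  intro raw filepath line_num _ hpre
  unfold Spec_unescape_yaml_value_py unescape_yaml_value_py unescape_yaml_value_py_alt
  rw [pvSplitOn_eq]
  obtain ⟨r, hr⟩ := Option.isSome_iff_exists.mp (pvPre_isSome raw filepath line_num hpre)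
  have hw := pvWalk_eq raw.toList
  cases hs : pvSplitB raw.toList with
  | nil => exact absurd hs (pvSplitB_ne_nil raw.toList)
  | cons p0 ps =>
    rw [hs] at hw
    rw [hr]
    have hw' : (pvBWalk ps).map (fun r => p0 ++ r) = some r := by rw [← hr, ← hw]
    obtain ⟨r', hr', hpr⟩ := Option.map_eq_some_iff.mp hw'
    show String.mk ((some r).getD []) = String.mk (p0 ++ (pvBWalk ps).getD [])
    rw [hr', ← hpr]
    rfl
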